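-- pv_equiv track=rewrite | github.com/nrastinger/vocabulary-comparison | Functions/vc.py | tag_compare
-- ===== SOURCE A (Python) =====
-- from collections import Counter, defaultdict
--
-- def generate():
--     return 0
--
-- def tag_compare(vocabs): #input scheme: [(vocab, vocab_name), (vocab, vocab_name)] - vocab (dict), vocab_name (str)
--     #collection of all distinct tags
--     tags = []
--     for vocab in vocabs:
--         for key in vocab[0].keys():
--             if key not in tags:
--                 tags.append(key)
--     #systematic comparison of all distinct tags with single vocabs
--     vgl = {}
--     for tag in tags:
--         vgl[tag] = defaultdict(generate)
--         sum = 0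
--         for vocab in vocabs:
--             if tag in vocab[0].keys():
--                 vgl[tag][vocab[1]] = vgl[tag][vocab[1]] + 1
--                 sum = sum + 1
--             else:
--                 vgl[tag][vocab[1]] = vgl[tag][vocab[1]]
--         vgl[tag]["sum"] = sum
--     return vgl
-- ===== SOURCE B (Python) =====
-- from collections import defaultdict
--
-- def generate():
--     return 0
--
-- def tag_compare(vocabs):
--     # One counting pass over the data: collect ordered distinct tags and names while
--     # counting (tag, name) occurrences and per-tag totals; then assemble.
--     tags = []
--     names = []
--     counts = {}   # (tag, name) -> number of vocabs with that name containing tag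
--     totals = {}   # tag -> number of vocabs containing tag
--     for vocab, name in vocabs:
--         if name not in names:
--             names.append(name)
--         for key in vocab.keys():
--             if key not in tags:
--                 tags.append(key)
--             counts[(key, name)] = counts.get((key, name), 0) + 1
--             totals[key] = totals.get(key, 0) + 1
--     vgl = {}
--     for tag in tags:
--         d = defaultdict(generate)
--         for name in names:
--             d[name] = counts.get((tag, name), 0)
--         d["sum"] = totals[tag]
--         vgl[tag] = d
--     return vgl
-- ===== Notes on version B (the rewrite author's own statement) =====
-- stated objective: alternative
-- what changed: Instead of re-scanning every vocab for each distinct tag (a per-tag membership test against every vocab), B makes one counting pass over all vocabs' keys building (tag,name) counts and per-tag totals, then assembles the result table by dictionary lookup.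
import Mathlib
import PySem

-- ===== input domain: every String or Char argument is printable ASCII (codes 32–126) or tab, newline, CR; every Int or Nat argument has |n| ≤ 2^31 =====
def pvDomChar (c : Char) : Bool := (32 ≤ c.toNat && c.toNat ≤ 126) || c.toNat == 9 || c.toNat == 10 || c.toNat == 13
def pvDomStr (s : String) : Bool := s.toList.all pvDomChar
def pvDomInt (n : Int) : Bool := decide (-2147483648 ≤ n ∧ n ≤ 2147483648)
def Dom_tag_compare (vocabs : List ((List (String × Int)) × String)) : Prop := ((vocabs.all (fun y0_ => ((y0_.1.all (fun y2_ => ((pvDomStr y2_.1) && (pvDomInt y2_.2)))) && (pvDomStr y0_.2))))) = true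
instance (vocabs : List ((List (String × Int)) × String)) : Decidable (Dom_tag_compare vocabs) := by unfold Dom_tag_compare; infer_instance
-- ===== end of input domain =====

-- B replaces A's per-tag membership scan over all vocabs by a single counting pass over the
-- data plus a lookup-based assembly (objective: alternative — a different traversal, same cost).

-- vocab[0].keys(): the Python dict's keys are the assoc list's distinct keys in first-occurrence order
def pyKeys (vocab : List (String × Int)) : List String :=
  PySem.List.dedup (vocab.map Prod.fst)

-- ===== PORT A =====
def tag_compare (vocabs : List ((List (String × Int)) × String)) : List (String × List (String × Int)) :=
  -- collection of all distinct tags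
  let tags : List String :=
    vocabs.foldl (fun tags vocab =>
      (pyKeys vocab.1).foldl (fun tags key =>
        if tags.contains key then tags else tags ++ [key]) tags) []
  -- systematic comparison of all distinct tags with single vocabs
  let vgl : PySem.Dict String (List (String × Int)) :=
    tags.foldl (fun vgl tag =>
      let p : PySem.Dict String Int × Int :=
        vocabs.foldl (fun p vocab =>
          if (pyKeys vocab.1).contains tag then
            (p.1.insert vocab.2 (p.1.getD vocab.2 0 + 1), p.2 + 1)
          else
            (p.1.insert vocab.2 (p.1.getD vocab.2 0), p.2)) (PySem.Dict.empty, 0)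
      vgl.insert tag ((p.1.insert "sum" p.2).items)) PySem.Dict.empty
  vgl.items

-- ===== PORT B =====
def tag_compare_alt (vocabs : List ((List (String × Int)) × String)) : List (String × List (String × Int)) :=
  -- one counting pass: ordered distinct tags and names, (tag, name) counts, per-tag totals
  let st :=
    vocabs.foldl
      (fun (st : List String × List String × PySem.Dict (String × String) Int × PySem.Dict String Int) vocab =>
        let names := if st.2.1.contains vocab.2 then st.2.1 else st.2.1 ++ [vocab.2]
        (pyKeys vocab.1).foldl
          (fun st key =>
            (if st.1.contains key then st.1 else st.1 ++ [key],
             st.2.1,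
             st.2.2.1.insert (key, vocab.2) (st.2.2.1.getD (key, vocab.2) 0 + 1),
             st.2.2.2.insert key (st.2.2.2.getD key 0 + 1)))
          (st.1, names, st.2.2.1, st.2.2.2))
      ([], [], PySem.Dict.empty, PySem.Dict.empty)
  let tags := st.1
  let names := st.2.1
  let counts := st.2.2.1
  let totals := st.2.2.2
  -- assembly; totals[tag] never raises: every tag was counted at least once
  (tags.foldl (fun vgl tag =>
      vgl.insert tag
        (((names.foldl (fun d n => d.insert n (counts.getD (tag, n) 0)) PySem.Dict.empty).insert
            "sum" (totals.getD tag 0)).items))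
    (PySem.Dict.empty : PySem.Dict String (List (String × Int)))).items

-- ===== PRECONDITION & SPEC =====
def Spec_tag_compare (vocabs : List ((List (String × Int)) × String)) (out : List (String × List (String × Int))) : Prop := out = tag_compare_alt vocabs
instance (vocabs : List ((List (String × Int)) × String)) (out : List (String × List (String × Int))) : Decidable (Spec_tag_compare vocabs out) := by unfold Spec_tag_compare; infer_instance

-- ===== CLAIM (what is proved, stated in full; the proofs are below) =====
def Claim_equal_tag_compare : Prop := ∀ (vocabs : List ((List (String × Int)) × String)), Dom_tag_compare vocabs → Spec_tag_compare vocabs (tag_compare vocabs)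


-- ===== LEMMAS AND PROOFS =====

-- the four quantities B's single pass accumulates, as separate folds
def bTags (vocabs : List ((List (String × Int)) × String)) : List String :=
  vocabs.foldl (fun tags vocab =>
    (pyKeys vocab.1).foldl (fun tags key =>
      if tags.contains key then tags else tags ++ [key]) tags) []

def bNames (vocabs : List ((List (String × Int)) × String)) : List String :=
  vocabs.foldl (fun n vocab => if n.contains vocab.2 then n else n ++ [vocab.2]) []

def bCounts (vocabs : List ((List (String × Int)) × String)) : PySem.Dict (String × String) Int :=
  vocabs.foldl (fun c vocab =>
    (pyKeys vocab.1).foldl (fun c key =>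
      c.insert (key, vocab.2) (c.getD (key, vocab.2) 0 + 1)) c) PySem.Dict.empty

def bTotals (vocabs : List ((List (String × Int)) × String)) : PySem.Dict String Int :=
  vocabs.foldl (fun t vocab =>
    (pyKeys vocab.1).foldl (fun t key => t.insert key (t.getD key 0 + 1)) t) PySem.Dict.empty

lemma pyKeys_nodup (vocab : List (String × Int)) : (pyKeys vocab).Nodup := by
  rw [pyKeys, PySem.List.dedup_eq_ofList]; exact PySem.Set.nodup_ofList _

-- B's one inner fold over a vocab's keys is three independent inner folds
lemma inner_split (ks : List String) (v2 : String) (t n : List String)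
    (c : PySem.Dict (String × String) Int) (tt : PySem.Dict String Int) :
    ks.foldl (fun st key =>
        ((if st.1.contains key then st.1 else st.1 ++ [key] : List String),
         st.2.1,
         st.2.2.1.insert (key, v2) (st.2.2.1.getD (key, v2) 0 + 1),
         st.2.2.2.insert key (st.2.2.2.getD key 0 + 1)))
      (t, n, c, tt)
    = (ks.foldl (fun t key => if t.contains key then t else t ++ [key]) t, n,
       ks.foldl (fun c key => c.insert (key, v2) (c.getD (key, v2) 0 + 1)) c,
       ks.foldl (fun t key => t.insert key (t.getD key 0 + 1)) tt) := by
  induction ks generalizing t n c tt with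
  | nil => rfl
  | cons k ks ih => simp only [List.foldl_cons, ih]

-- B's single pass, separated into the four folds
lemma b_split2 (vocabs : List ((List (String × Int)) × String)) (t n : List String)
    (c : PySem.Dict (String × String) Int) (tt : PySem.Dict String Int) :
    vocabs.foldl
      (fun (st : List String × List String × PySem.Dict (String × String) Int × PySem.Dict String Int)
           (vocab : (List (String × Int)) × String) =>
        ((pyKeys vocab.1).foldl (fun tg key => if tg.contains key then tg else tg ++ [key]) st.1,
         (if st.2.1.contains vocab.2 then st.2.1 else st.2.1 ++ [vocab.2]),
         (pyKeys vocab.1).foldl (fun c key =>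
            c.insert (key, vocab.2) (c.getD (key, vocab.2) 0 + 1)) st.2.2.1,
         (pyKeys vocab.1).foldl (fun t key => t.insert key (t.getD key 0 + 1)) st.2.2.2))
      (t, n, c, tt)
    = (vocabs.foldl (fun tg vocab =>
          (pyKeys vocab.1).foldl (fun tg key =>
            if tg.contains key then tg else tg ++ [key]) tg) t,
       vocabs.foldl (fun n vocab => if n.contains vocab.2 then n else n ++ [vocab.2]) n,
       vocabs.foldl (fun c vocab =>
          (pyKeys vocab.1).foldl (fun c key =>
            c.insert (key, vocab.2) (c.getD (key, vocab.2) 0 + 1)) c) c,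
       vocabs.foldl (fun t vocab =>
          (pyKeys vocab.1).foldl (fun t key => t.insert key (t.getD key 0 + 1)) t) tt) := by
  induction vocabs generalizing t n c tt with
  | nil => rfl
  | cons v vs ih => simp only [List.foldl_cons, ih]

lemma b_fold_eq (vocabs : List ((List (String × Int)) × String)) :
    vocabs.foldl
      (fun (st : List String × List String × PySem.Dict (String × String) Int × PySem.Dict String Int) vocab =>
        let names := if st.2.1.contains vocab.2 then st.2.1 else st.2.1 ++ [vocab.2]
        (pyKeys vocab.1).foldl
          (fun st key =>
            (if st.1.contains key then st.1 else st.1 ++ [key],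
             st.2.1,
             st.2.2.1.insert (key, vocab.2) (st.2.2.1.getD (key, vocab.2) 0 + 1),
             st.2.2.2.insert key (st.2.2.2.getD key 0 + 1)))
          (st.1, names, st.2.2.1, st.2.2.2))
      ([], [], PySem.Dict.empty, PySem.Dict.empty)
    = (bTags vocabs, bNames vocabs, bCounts vocabs, bTotals vocabs) := by
  have hstep : (fun (st : List String × List String × PySem.Dict (String × String) Int × PySem.Dict String Int)
           (vocab : (List (String × Int)) × String) =>
        let names := if st.2.1.contains vocab.2 then st.2.1 else st.2.1 ++ [vocab.2]
        (pyKeys vocab.1).foldl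
          (fun st key =>
            (if st.1.contains key then st.1 else st.1 ++ [key],
             st.2.1,
             st.2.2.1.insert (key, vocab.2) (st.2.2.1.getD (key, vocab.2) 0 + 1),
             st.2.2.2.insert key (st.2.2.2.getD key 0 + 1)))
          (st.1, names, st.2.2.1, st.2.2.2))
      = (fun (st : List String × List String × PySem.Dict (String × String) Int × PySem.Dict String Int)
           (vocab : (List (String × Int)) × String) =>
        ((pyKeys vocab.1).foldl (fun tg key => if tg.contains key then tg else tg ++ [key]) st.1,
         (if st.2.1.contains vocab.2 then st.2.1 else st.2.1 ++ [vocab.2]),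
         (pyKeys vocab.1).foldl (fun c key =>
            c.insert (key, vocab.2) (c.getD (key, vocab.2) 0 + 1)) st.2.2.1,
         (pyKeys vocab.1).foldl (fun t key => t.insert key (t.getD key 0 + 1)) st.2.2.2)) := by
    funext st vocab
    exact inner_split (pyKeys vocab.1) vocab.2 st.1
      (if st.2.1.contains vocab.2 then st.2.1 else st.2.1 ++ [vocab.2]) st.2.2.1 st.2.2.2
  rw [hstep, b_split2, bTags, bNames, bCounts, bTotals]

-- B as the assembly of the four folds
lemma alt_eq (vocabs : List ((List (String × Int)) × String)) :
    tag_compare_alt vocabs =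
      ((bTags vocabs).foldl (fun vgl tag =>
          vgl.insert tag
            ((((bNames vocabs).foldl
                  (fun d n => d.insert n ((bCounts vocabs).getD (tag, n) 0)) PySem.Dict.empty).insert
                "sum" ((bTotals vocabs).getD tag 0)).items))
        (PySem.Dict.empty : PySem.Dict String (List (String × Int)))).items := by
  simp only [tag_compare_alt, b_fold_eq]

-- generic: a counting-insert fold's lookup
lemma getD_foldl_insert_add {kappa beta : Type} [BEq kappa] [LawfulBEq kappa] [DecidableEq kappa]
    (l : List beta) (key : beta → kappa) (w : beta → Int) (d : PySem.Dict kappa Int) (x : kappa) :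
    (l.foldl (fun d v => d.insert (key v) (d.getD (key v) 0 + w v)) d).getD x 0
    = d.getD x 0 + ((l.filter (fun v => key v == x)).map w).sum := by
  induction l generalizing d with
  | nil => simp
  | cons v l ih =>
    rw [List.foldl_cons, ih, PySem.Dict.getD_insert, List.filter_cons]
    by_cases h : x = key v
    · subst h
      simp
      ring
    · have hb : (key v == x) = false := by simp [Ne.symm h]
      simp [h, hb]

-- A's per-tag pair fold, split into dict and counter
def aDict (vocabs : List ((List (String × Int)) × String)) (tag : String) : PySem.Dict String Int :=
  vocabs.foldl (fun d vocab =>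
    d.insert vocab.2 (d.getD vocab.2 0 + (if (pyKeys vocab.1).contains tag then 1 else 0))) PySem.Dict.empty

lemma a_pair_split_gen (vocabs : List ((List (String × Int)) × String)) (tag : String)
    (d : PySem.Dict String Int) (s : Int) :
    vocabs.foldl (fun (p : PySem.Dict String Int × Int) vocab =>
        if (pyKeys vocab.1).contains tag then
          (p.1.insert vocab.2 (p.1.getD vocab.2 0 + 1), p.2 + 1)
        else
          (p.1.insert vocab.2 (p.1.getD vocab.2 0), p.2)) (d, s)
    = (vocabs.foldl (fun d vocab =>
         d.insert vocab.2 (d.getD vocab.2 0 + (if (pyKeys vocab.1).contains tag then 1 else 0))) d,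
       s + (vocabs.countP (fun v => (pyKeys v.1).contains tag) : Int)) := by
  induction vocabs generalizing d s with
  | nil => simp
  | cons v vs ih =>
    rw [List.foldl_cons, List.foldl_cons, List.countP_cons]
    by_cases h : (pyKeys v.1).contains tag
    · rw [if_pos h, ih]
      dsimp only
      rw [if_pos h, if_pos h]
      refine Prod.ext rfl ?_
      push_cast
      ring
    · rw [if_neg h, ih]
      dsimp only
      rw [if_neg h, add_zero, if_neg h, Nat.add_zero]

lemma a_pair_split (vocabs : List ((List (String × Int)) × String)) (tag : String) :
    vocabs.foldl (fun (p : PySem.Dict String Int × Int) vocab =>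
        if (pyKeys vocab.1).contains tag then
          (p.1.insert vocab.2 (p.1.getD vocab.2 0 + 1), p.2 + 1)
        else
          (p.1.insert vocab.2 (p.1.getD vocab.2 0), p.2)) (PySem.Dict.empty, 0)
    = (aDict vocabs tag, (vocabs.countP (fun v => (pyKeys v.1).contains tag) : Int)) := by
  rw [a_pair_split_gen, aDict, zero_add]

-- flattened key/name pair stream of the input
def pairStream (vocabs : List ((List (String × Int)) × String)) : List (String × String) :=
  vocabs.flatMap (fun v => (pyKeys v.1).map (fun k => (k, v.2)))

lemma bCounts_eq_counter (vocabs : List ((List (String × Int)) × String)) :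
    bCounts vocabs = PySem.Dict.counter (pairStream vocabs) := by
  rw [← PySem.Dict.foldl_insert_getD_add_one_eq_counter, pairStream, List.foldl_flatMap, bCounts]
  congr 1
  funext c v
  rw [List.foldl_map]

lemma count_pairStream (vocabs : List ((List (String × Int)) × String)) (tag n : String) :
    (pairStream vocabs).count (tag, n)
    = vocabs.countP (fun v => v.2 == n && (pyKeys v.1).contains tag) := by
  induction vocabs with
  | nil => rfl
  | cons v vs ih =>
    rw [pairStream, List.flatMap_cons, List.count_append, ← pairStream, ih, List.countP_cons]
    have hchunk : ((pyKeys v.1).map (fun k => (k, v.2))).count (tag, n)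
        = (if (v.2 == n && (pyKeys v.1).contains tag) then 1 else 0) := by
      by_cases hn : v.2 = n
      · subst hn
        have hinj : Function.Injective (fun k : String => (k, v.2)) := by
          intro a b hab
          simpa using hab
        rw [List.count_map_of_injective (pyKeys v.1) _ hinj tag,
          List.Nodup.count (pyKeys_nodup v.1)]
        by_cases ht : tag ∈ pyKeys v.1 <;> simp [ht]
      · have hnm : (tag, n) ∉ (pyKeys v.1).map (fun k => (k, v.2)) := by
          simp [Prod.mk.injEq, hn]
        rw [List.count_eq_zero.mpr hnm]
        simp [hn]
    omega

def tagStream (vocabs : List ((List (String × Int)) × String)) : List String :=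
  vocabs.flatMap (fun v => pyKeys v.1)

lemma bTotals_eq_counter (vocabs : List ((List (String × Int)) × String)) :
    bTotals vocabs = PySem.Dict.counter (tagStream vocabs) := by
  rw [← PySem.Dict.foldl_insert_getD_add_one_eq_counter, tagStream, List.foldl_flatMap, bTotals]

lemma count_tagStream (vocabs : List ((List (String × Int)) × String)) (tag : String) :
    (tagStream vocabs).count tag = vocabs.countP (fun v => (pyKeys v.1).contains tag) := by
  induction vocabs with
  | nil => rfl
  | cons v vs ih =>
    rw [tagStream, List.flatMap_cons, List.count_append, ← tagStream, ih, List.countP_cons]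
    have hchunk : (pyKeys v.1).count tag = (if (pyKeys v.1).contains tag then 1 else 0) := by
      rw [List.Nodup.count (pyKeys_nodup v.1)]
      by_cases ht : tag ∈ pyKeys v.1 <;> simp [ht]
    omega

-- a 0/1 sum over a filtered list is a conjunctive count
lemma sum_map_ite_filter {beta : Type} (l : List beta) (p q : beta → Bool) :
    ((l.filter q).map (fun v => if p v then (1 : Int) else 0)).sum
    = (l.countP (fun v => q v && p v) : Int) := by
  induction l with
  | nil => rfl
  | cons v vs ih =>
    rw [List.filter_cons, List.countP_cons]
    by_cases hq : q v
    · by_cases hp : p v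
      · simp [hq, hp, ih]
        ring
      · simp [hq, hp, ih]
    · simp [hq, ih]

-- the key pointwise fact: A's per-tag per-name tally equals B's precomputed count
lemma getD_aDict (vocabs : List ((List (String × Int)) × String)) (tag n : String) :
    (aDict vocabs tag).getD n 0 = (bCounts vocabs).getD (tag, n) 0 := by
  have h1 := getD_foldl_insert_add vocabs (fun v => v.2)
    (fun v => if (pyKeys v.1).contains tag then (1 : Int) else 0) PySem.Dict.empty n
  rw [aDict, h1, bCounts_eq_counter, PySem.Dict.getD_counter, count_pairStream,
    sum_map_ite_filter vocabs (fun v => (pyKeys v.1).contains tag) (fun v => v.2 == n)]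
  simp

lemma bNames_eq (vocabs : List ((List (String × Int)) × String)) :
    bNames vocabs = PySem.Set.ofList (vocabs.map Prod.snd) := by
  rw [PySem.Set.ofList_eq_foldl, List.foldl_map, bNames]
  congr 1

lemma bNames_nodup (vocabs : List ((List (String × Int)) × String)) : (bNames vocabs).Nodup := by
  rw [bNames_eq]
  exact PySem.Set.nodup_ofList _

-- A's per-tag dict rendered over B's name list
lemma aDict_items (vocabs : List ((List (String × Int)) × String)) (tag : String) :
    (aDict vocabs tag).items
    = (bNames vocabs).map (fun n => (n, (aDict vocabs tag).getD n 0)) := by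
  have hkeys : (aDict vocabs tag).keys = bNames vocabs := by
    rw [aDict, PySem.Dict.keys_foldl_insert_key vocabs (fun v => v.2)
      (fun d v => d.getD v.2 0 + (if (pyKeys v.1).contains tag then 1 else 0)) PySem.Dict.empty,
      PySem.Dict.keys_empty, PySem.Set.update_nil_left, bNames_eq]
  have hnd : (aDict vocabs tag).keys.Nodup := by
    rw [hkeys]
    exact bNames_nodup vocabs
  rw [PySem.Dict.items_eq_map_keys _ hnd 0, hkeys]

-- B's per-tag dict items
lemma bDict_items (vocabs : List ((List (String × Int)) × String)) (tag : String) :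
    ((bNames vocabs).foldl (fun d n => d.insert n ((bCounts vocabs).getD (tag, n) 0))
        PySem.Dict.empty).items
    = (bNames vocabs).map (fun n => (n, (bCounts vocabs).getD (tag, n) 0)) := by
  have h := PySem.Dict.items_foldl_insert_fresh (bNames vocabs) (fun n => n)
    (fun n => (bCounts vocabs).getD (tag, n) 0) PySem.Dict.empty
    (fun a _ => by simp [PySem.Dict.contains_empty])
    (by simpa using bNames_nodup vocabs)
  simpa using h

-- the per-tag dicts agree
lemma inner_dict_eq (vocabs : List ((List (String × Int)) × String)) (tag : String) :
    aDict vocabs tag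
    = (bNames vocabs).foldl (fun d n => d.insert n ((bCounts vocabs).getD (tag, n) 0))
        PySem.Dict.empty := by
  apply PySem.Dict.ext
  rw [aDict_items, bDict_items]
  exact List.map_congr_left (fun n _ => by rw [getD_aDict])

lemma inner_sum_eq (vocabs : List ((List (String × Int)) × String)) (tag : String) :
    (vocabs.countP (fun v => (pyKeys v.1).contains tag) : Int)
    = (bTotals vocabs).getD tag 0 := by
  rw [bTotals_eq_counter, PySem.Dict.getD_counter, count_tagStream]

lemma main_eq (vocabs : List ((List (String × Int)) × String)) :
    tag_compare vocabs = tag_compare_alt vocabs := by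
  rw [alt_eq]
  simp only [tag_compare, bTags]
  congr 1
  apply PySem.List.foldl_congr_mem
  intro acc tag _
  rw [a_pair_split, inner_dict_eq, inner_sum_eq]

-- ===== VERDICT (by name: the statement is the Claim_ definition above) =====
theorem tag_compare_spec : Claim_equal_tag_compare := by
  intro vocabs _
  unfold Spec_tag_compare
  exact main_eq vocabs
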